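-- pv_equiv track=rewrite | github.com/vanchien/ToolFB | src/services/video_editor/remote_stock_audio.py | _ordered_download_urls
-- ===== SOURCE A (Python) =====
-- def _needs_freesound_api_token(url: str) -> bool:
--     """
--     URL cần header Authorization (Freesound API).
--     Không dùng quy tắc chung «/download» — tránh nhầm CDN / host khác.
--     """
--     u = url.lower()
--     if "cdn.freesound.org" in u or "media.freesound.org" in u:
--         return False
--     if "freesound.org" not in u:
--         return False
--     if "/apiv2/" in u and "download" in u:
--         return True
--     if "/sounds/" in u and "/download" in u:
--         return True
--     return False
--
-- def _ordered_download_urls(candidates: list[str], freesound_api_key: str) -> list[str]: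
--     """Ưu tiên URL không cần token (CDN, Jamendo…) — tránh 401 khi chỉ có preview công khai."""
--     key = str(freesound_api_key or "").strip()
--     public: list[str] = []
--     private: list[str] = []
--     for u in candidates:
--         if not u:
--             continue
--         if _needs_freesound_api_token(u):
--             private.append(u)
--         else:
--             public.append(u)
--     if key:
--         return public + private
--     return public + private
-- ===== SOURCE B (Python) =====
-- def _needs_freesound_api_token(url: str) -> bool:
--     u = url.lower()
--     if "cdn.freesound.org" in u or "media.freesound.org" in u:
--         return False
--     if "freesound.org" not in u:
--         return False
--     if "/apiv2/" in u and "download" in u: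
--         return True
--     if "/sounds/" in u and "/download" in u:
--         return True
--     return False
--
-- def _ordered_download_urls(candidates: list[str], freesound_api_key: str) -> list[str]:
--     # Stable sort: False < True puts token-free (public) URLs first, original
--     # order preserved within each group; falsy URLs are skipped.
--     return sorted((u for u in candidates if u), key=_needs_freesound_api_token)
-- ===== Notes on version B (the rewrite author's own statement) =====
-- stated objective: simpler
-- what changed: Replaces the explicit two-accumulator partition loop (and the dead key normalization whose two branches return the same thing) with a single stable sort of the truthy URLs keyed on the token predicate; stability plus False<True reproduces public-then-private order exactly.
import Mathlib
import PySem

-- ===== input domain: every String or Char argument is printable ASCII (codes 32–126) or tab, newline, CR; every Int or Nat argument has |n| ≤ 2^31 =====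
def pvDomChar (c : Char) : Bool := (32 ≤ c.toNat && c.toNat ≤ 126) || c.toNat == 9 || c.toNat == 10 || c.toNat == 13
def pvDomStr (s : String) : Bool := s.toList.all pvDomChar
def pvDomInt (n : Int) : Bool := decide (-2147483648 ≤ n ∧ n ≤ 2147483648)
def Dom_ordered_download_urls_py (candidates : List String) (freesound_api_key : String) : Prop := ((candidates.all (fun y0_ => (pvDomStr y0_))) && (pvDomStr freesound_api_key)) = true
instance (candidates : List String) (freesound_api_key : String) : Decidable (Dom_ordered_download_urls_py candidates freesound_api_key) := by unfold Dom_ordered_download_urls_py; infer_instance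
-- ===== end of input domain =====

-- B replaces A's two-accumulator partition loop (and the dead key normalization)
-- with one stable sort of the truthy URLs keyed on the token predicate (simpler).


-- ===== PORT A =====
-- shared module helper _needs_freesound_api_token (used by both Pythons)
def pvNeedsToken (url : String) : Bool :=
  let u := PySem.Str.lower url
  if PySem.Str.isIn "cdn.freesound.org" u || PySem.Str.isIn "media.freesound.org" u then false
  else if !(PySem.Str.isIn "freesound.org" u) then false
  else if PySem.Str.isIn "/apiv2/" u && PySem.Str.isIn "download" u then true
  else if PySem.Str.isIn "/sounds/" u && PySem.Str.isIn "/download" u then true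
  else false

def ordered_download_urls_py (candidates : List String) (freesound_api_key : String) : List String :=
  let key := PySem.Str.strip (if freesound_api_key == "" then "" else freesound_api_key)
  let pp := candidates.foldl (fun (acc : List String × List String) u =>
      if u = "" then acc
      else if pvNeedsToken u then (acc.1, acc.2 ++ [u])
      else (acc.1 ++ [u], acc.2)) ([], [])
  if key != "" then pp.1 ++ pp.2 else pp.1 ++ pp.2

-- ===== PORT B =====
def ordered_download_urls_py_alt (candidates : List String) (freesound_api_key : String) : List String :=
  PySem.List.sorted (candidates.filter (fun u => !(u == ""))) pvNeedsToken false

-- ===== PRECONDITION & SPEC =====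
def Spec_ordered_download_urls_py (candidates : List String) (freesound_api_key : String) (out : List String) : Prop := out = ordered_download_urls_py_alt candidates freesound_api_key
instance (candidates : List String) (freesound_api_key : String) (out : List String) : Decidable (Spec_ordered_download_urls_py candidates freesound_api_key out) := by unfold Spec_ordered_download_urls_py; infer_instance

-- ===== CLAIM (what is proved, stated in full; the proofs are below) =====
def Claim_equal_ordered_download_urls_py : Prop := ∀ (candidates : List String) (freesound_api_key : String), Dom_ordered_download_urls_py candidates freesound_api_key → Spec_ordered_download_urls_py candidates freesound_api_key (ordered_download_urls_py candidates freesound_api_key)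

-- ===== LEMMAS AND PROOFS =====

-- insertBy with a Bool key: a key-false element lands right after the existing
-- key-false prefix; a key-true element lands at the very end.
theorem insertBy_bool_false {α : Type} (key : α → Bool) (x : α) (hx : key x = false) :
    ∀ (f t : List α), (∀ y ∈ f, key y = false) → (∀ y ∈ t, key y = true) →
    PySem.List.insertBy (fun a b => decide (key a < key b)) x (f ++ t) = (f ++ [x]) ++ t := by
  intro f
  induction f with
  | nil =>
    intro t _ ht
    cases t with
    | nil => simp [PySem.List.insertBy]
    | cons y ys =>
      have : key y = true := ht y (by simp)
      simp [PySem.List.insertBy, hx, this]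
  | cons z f ih =>
    intro t hf ht
    have hz : key z = false := hf z (by simp)
    have hrec := ih t (fun y hy => hf y (List.mem_cons_of_mem _ hy)) ht
    simp [PySem.List.insertBy, hx, hz, hrec]

theorem insertBy_bool_true {α : Type} (key : α → Bool) (x : α) (hx : key x = true) :
    ∀ (l : List α),
    PySem.List.insertBy (fun a b => decide (key a < key b)) x l = l ++ [x] := by
  intro l
  induction l with
  | nil => simp [PySem.List.insertBy]
  | cons y ys ih =>
    have : decide (key x < key y) = false := by
      rw [hx]; cases key y <;> decide
    simp [PySem.List.insertBy, this, ih]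

-- the sorted-fold over a Bool key extends a (false-block ++ true-block) accumulator
theorem foldl_insertBy_bool {α : Type} (key : α → Bool) :
    ∀ (xs f t : List α), (∀ y ∈ f, key y = false) → (∀ y ∈ t, key y = true) →
    xs.foldl (fun acc x => PySem.List.insertBy (fun a b => decide (key a < key b)) x acc) (f ++ t)
      = (f ++ xs.filter (fun x => !(key x))) ++ (t ++ xs.filter key) := by
  intro xs
  induction xs with
  | nil => intro f t _ _; simp
  | cons x xs ih =>
    intro f t hf ht
    simp only [List.foldl_cons]
    cases hx : key x with
    | false =>
      have hf' : ∀ y ∈ f ++ [x], key y = false := by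
        intro y hy
        rw [List.mem_append] at hy
        cases hy with
        | inl h => exact hf y h
        | inr h => simp at h; simpa [h] using hx
      rw [insertBy_bool_false key x hx f t hf ht, ih (f ++ [x]) t hf' ht]
      simp [hx]
    | true =>
      have ht' : ∀ y ∈ t ++ [x], key y = true := by
        intro y hy
        rw [List.mem_append] at hy
        cases hy with
        | inl h => exact ht y h
        | inr h => simp at h; simpa [h] using hx
      have hsplit : f ++ t ++ [x] = f ++ (t ++ [x]) := by simp
      rw [insertBy_bool_true key x hx (f ++ t), hsplit, ih f (t ++ [x]) hf ht']
      simp [hx]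

-- B in closed form: public (non-token) truthy URLs, then private (token) truthy URLs
theorem alt_eq (candidates : List String) (freesound_api_key : String) :
    ordered_download_urls_py_alt candidates freesound_api_key
      = candidates.filter (fun u => !(u == "") && !(pvNeedsToken u))
        ++ candidates.filter (fun u => !(u == "") && pvNeedsToken u) := by
  unfold ordered_download_urls_py_alt PySem.List.sorted
  simp only [if_neg (by simp : ¬ (false = true))]
  have := foldl_insertBy_bool pvNeedsToken (candidates.filter (fun u => !(u == ""))) [] []
    (by simp) (by simp)
  simp only [List.nil_append, List.append_nil] at this
  rw [this, List.filter_filter, List.filter_filter]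
  congr 1 <;> (apply List.filter_congr; intro a _; cases h : (a == "") <;> cases h2 : pvNeedsToken a <;> simp)

-- A's fold in closed form
theorem a_fold_eq (candidates : List String) :
    ∀ (p q : List String),
    candidates.foldl (fun (acc : List String × List String) u =>
      if u = "" then acc
      else if pvNeedsToken u then (acc.1, acc.2 ++ [u])
      else (acc.1 ++ [u], acc.2)) (p, q)
    = (p ++ candidates.filter (fun u => !(u == "") && !(pvNeedsToken u)),
       q ++ candidates.filter (fun u => !(u == "") && pvNeedsToken u)) := by
  induction candidates with
  | nil => simp
  | cons x xs ih =>
    intro p q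
    by_cases hx : x = ""
    · simp only [List.foldl_cons, if_pos hx, ih p q, List.filter_cons]
      simp [hx]
    · by_cases ht : pvNeedsToken x = true
      · simp only [List.foldl_cons, if_neg hx, if_pos ht, ih p (q ++ [x]), List.filter_cons]
        simp [hx, ht]
      · simp only [List.foldl_cons, if_neg hx, if_neg ht, ih (p ++ [x]) q, List.filter_cons]
        simp [hx, Bool.of_not_eq_true ht]

-- ===== VERDICT (by name: the statement is the Claim_ definition above) =====
theorem ordered_download_urls_py_spec : Claim_equal_ordered_download_urls_py := by
  intro candidates freesound_api_key _
  unfold Spec_ordered_download_urls_py ordered_download_urls_py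
  rw [alt_eq, a_fold_eq candidates [] []]
  split <;> simp
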